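-- pv_equiv track=rewrite | github.com/steveonw/text-to-3d | scripts/helpers/threejs_patch_diff.py | diff_symbols
-- ===== SOURCE A (Python) =====
-- def diff_symbols(a: dict[str, list[str]], b: dict[str, list[str]]) -> dict:
--     out = {}
--     for key in a:
--         sa, sb = set(a[key]), set(b[key])
--         out[key] = {
--             "added": sorted(sb - sa),
--             "removed": sorted(sa - sb),
--             "kept": sorted(sa & sb),
--         }
--     return out
-- ===== SOURCE B (Python) =====
-- def diff_symbols(a: dict[str, list[str]], b: dict[str, list[str]]) -> dict:
--     out = {}
--     for key in a:
--         xs = sorted(set(a[key]))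
--         ys = sorted(set(b[key]))
--         added, removed, kept = [], [], []
--         i = j = 0
--         while i < len(xs) and j < len(ys):
--             if xs[i] == ys[j]:
--                 kept.append(xs[i])
--                 i += 1
--                 j += 1
--             elif xs[i] < ys[j]:
--                 removed.append(xs[i])
--                 i += 1
--             else:
--                 added.append(ys[j])
--                 j += 1
--         removed.extend(xs[i:])
--         added.extend(ys[j:])
--         out[key] = {"added": added, "removed": removed, "kept": kept}
--     return out
-- ===== Notes on version B (the rewrite author's own statement) =====
-- stated objective: alternative
-- what changed: Per key, B sorts each side once and computes added/removed/kept by a two-pointer merge of the two sorted deduplicated lists (ordered comparisons, no set difference/intersection and no membership tests), instead of A's three set operations each followed by its own sort.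
import Mathlib
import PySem

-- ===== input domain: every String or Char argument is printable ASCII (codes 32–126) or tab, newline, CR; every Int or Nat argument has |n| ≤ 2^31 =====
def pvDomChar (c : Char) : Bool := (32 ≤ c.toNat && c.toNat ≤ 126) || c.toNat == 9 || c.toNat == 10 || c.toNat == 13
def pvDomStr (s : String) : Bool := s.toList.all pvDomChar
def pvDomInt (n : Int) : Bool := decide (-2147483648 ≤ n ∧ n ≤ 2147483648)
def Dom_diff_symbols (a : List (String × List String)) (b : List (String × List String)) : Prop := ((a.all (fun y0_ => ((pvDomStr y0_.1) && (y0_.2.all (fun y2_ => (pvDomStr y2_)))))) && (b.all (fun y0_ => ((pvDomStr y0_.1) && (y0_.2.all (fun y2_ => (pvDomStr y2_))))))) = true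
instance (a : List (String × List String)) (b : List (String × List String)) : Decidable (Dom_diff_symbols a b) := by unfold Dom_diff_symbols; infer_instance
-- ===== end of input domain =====

-- ===== PORT A =====
-- B replaces A's three set operations (each followed by its own sort) per key by one sort of each side
-- and a two-pointer merge producing added/removed/kept; alternative decomposition, same results.
def diff_symbols (a : List (String × List String)) (b : List (String × List String)) : List (String × List (String × List String)) :=
  (a.foldl
    (fun (out : PySem.Dict String (List (String × List String))) p =>
      let sa := PySem.Set.ofList (PySem.Dict.getD ⟨a⟩ p.1 [])
      let sb := PySem.Set.ofList (PySem.Dict.getD ⟨b⟩ p.1 [])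
      out.insert p.1
        [("added",   PySem.List.sorted (PySem.Set.diff sb sa) (fun x => x) false),
         ("removed", PySem.List.sorted (PySem.Set.diff sa sb) (fun x => x) false),
         ("kept",    PySem.List.sorted (PySem.Set.inter sa sb) (fun x => x) false)])
    (PySem.Dict.mk [])).items

-- ===== PORT B =====
-- the while loop over indices i, j of Source B, as structural recursion on the two (sorted) lists;
-- the trailing removed.extend(xs[i:]) / added.extend(ys[j:]) are the base cases.
def pvMerge (xs ys : List String) (ad rm kp : List String) : List String × List String × List String :=
  match xs, ys with
  | [], ys => (ad ++ ys, rm, kp)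
  | x :: xt, [] => (ad, rm ++ (x :: xt), kp)
  | x :: xt, y :: yt =>
    if x = y then pvMerge xt yt ad rm (kp ++ [x])
    else if x < y then pvMerge xt (y :: yt) ad (rm ++ [x]) kp
    else pvMerge (x :: xt) yt (ad ++ [y]) rm kp
termination_by xs.length + ys.length

def diff_symbols_alt (a : List (String × List String)) (b : List (String × List String)) : List (String × List (String × List String)) :=
  (a.foldl
    (fun (out : PySem.Dict String (List (String × List String))) p =>
      let xs := PySem.List.sorted (PySem.Set.ofList (PySem.Dict.getD ⟨a⟩ p.1 [])) (fun x => x) false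
      let ys := PySem.List.sorted (PySem.Set.ofList (PySem.Dict.getD ⟨b⟩ p.1 [])) (fun x => x) false
      let part := pvMerge xs ys [] [] []
      out.insert p.1 [("added", part.1), ("removed", part.2.1), ("kept", part.2.2)])
    (PySem.Dict.mk [])).items

-- ===== PRECONDITION & SPEC =====
-- Pre_ excludes exactly the inputs where Python A raises KeyError: a key of `a` absent from `b`.
def Pre_diff_symbols (a : List (String × List String)) (b : List (String × List String)) : Prop :=
  ∀ p ∈ a, p.1 ∈ b.map Prod.fst
instance (a : List (String × List String)) (b : List (String × List String)) : Decidable (Pre_diff_symbols a b) := by unfold Pre_diff_symbols; infer_instance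
def pvWitness_diff_symbols : (List (String × List String)) × (List (String × List String)) :=
  ([("k", ["x", "y"])], [("k", ["y", "z"])])
def Spec_diff_symbols (a : List (String × List String)) (b : List (String × List String)) (out : List (String × List (String × List String))) : Prop := out = diff_symbols_alt a b
instance (a : List (String × List String)) (b : List (String × List String)) (out : List (String × List (String × List String))) : Decidable (Spec_diff_symbols a b out) := by unfold Spec_diff_symbols; infer_instance

-- ===== CLAIM (what is proved, stated in full; the proofs are below) =====
def Claim_equal_diff_symbols : Prop := ∀ (a : List (String × List String)) (b : List (String × List String)), Dom_diff_symbols a b → Pre_diff_symbols a b → Spec_diff_symbols a b (diff_symbols a b)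

-- ===== LEMMAS AND PROOFS =====

-- the merge of two strictly increasing lists computes the three filters
lemma pvMerge_eq (xs ys : List String) (hx : xs.Pairwise (· < ·)) (hy : ys.Pairwise (· < ·))
    (ad rm kp : List String) :
    pvMerge xs ys ad rm kp
      = (ad ++ ys.filter (fun s => !xs.contains s),
         rm ++ xs.filter (fun s => !ys.contains s),
         kp ++ xs.filter (fun s => ys.contains s)) := by
  fun_induction pvMerge xs ys ad rm kp with
  | case1 ad rm kp ys => simp
  | case2 ad rm kp x xt => simp
  | case3 ad rm kp xt x yt ih =>
    have hx' : ∀ s ∈ xt, x < s := fun s hs => List.rel_of_pairwise_cons hx hs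
    have hy' : ∀ s ∈ yt, x < s := fun s hs => List.rel_of_pairwise_cons hy hs
    rw [ih hx.tail hy.tail]
    have cxy : (x :: yt).contains x = true := by simp
    have cxx : (x :: xt).contains x = true := by simp
    have c1 : List.filter (fun s => !(x :: xt).contains s) (x :: yt)
        = List.filter (fun s => !xt.contains s) yt := by
      rw [List.filter_cons, cxx]
      simp only [Bool.not_true]
      apply List.filter_congr; intro s hs
      simp [(ne_of_lt (hy' s hs)).symm]
    have c2 : List.filter (fun s => !(x :: yt).contains s) (x :: xt)
        = List.filter (fun s => !yt.contains s) xt := by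
      rw [List.filter_cons, cxy]
      simp only [Bool.not_true]
      apply List.filter_congr; intro s hs
      simp [(ne_of_lt (hx' s hs)).symm]
    have c3 : List.filter (fun s => (x :: yt).contains s) (x :: xt)
        = x :: List.filter (fun s => yt.contains s) xt := by
      rw [List.filter_cons, cxy]
      simp only [if_true]
      congr 1
      apply List.filter_congr; intro s hs
      simp [(ne_of_lt (hx' s hs)).symm]
    rw [c1, c2, c3]
    simp
  | case4 ad rm kp x xt y yt hne hlt ih =>
    have hx' : ∀ s ∈ xt, x < s := fun s hs => List.rel_of_pairwise_cons hx hs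
    have hy' : ∀ s ∈ yt, y < s := fun s hs => List.rel_of_pairwise_cons hy hs
    rw [ih hx.tail hy]
    have hxny : ∀ s ∈ y :: yt, x ≠ s := by
      intro s hs
      rcases List.mem_cons.mp hs with h | h
      · exact h ▸ ne_of_lt hlt
      · exact ne_of_lt (lt_trans hlt (hy' s h))
    have e2 : (y :: yt).contains x = false := by
      simp only [List.contains_eq_mem, decide_eq_false_iff_not]
      intro h; exact hxny x h rfl
    have c1 : List.filter (fun s => !(x :: xt).contains s) (y :: yt)
        = List.filter (fun s => !xt.contains s) (y :: yt) := by
      apply List.filter_congr; intro s hs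
      simp [(hxny s hs).symm]
    have c2 : List.filter (fun s => !(y :: yt).contains s) (x :: xt)
        = x :: List.filter (fun s => !(y :: yt).contains s) xt := by
      rw [List.filter_cons, e2]; simp
    have c3 : List.filter (fun s => (y :: yt).contains s) (x :: xt)
        = List.filter (fun s => (y :: yt).contains s) xt := by
      rw [List.filter_cons, e2]; simp
    rw [c1, c2, c3]
    simp
  | case5 ad rm kp x xt y yt hne hnlt ih =>
    have hx' : ∀ s ∈ xt, x < s := fun s hs => List.rel_of_pairwise_cons hx hs
    have hylt : y < x := lt_of_le_of_ne (not_lt.mp hnlt) (fun h => hne h.symm)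
    rw [ih hx hy.tail]
    have hyns : ∀ s ∈ x :: xt, y ≠ s := by
      intro s hs
      rcases List.mem_cons.mp hs with h | h
      · exact h ▸ ne_of_lt hylt
      · exact ne_of_lt (lt_trans hylt (hx' s h))
    have e1 : (x :: xt).contains y = false := by
      simp only [List.contains_eq_mem, decide_eq_false_iff_not]
      intro h; exact hyns y h rfl
    have c1 : List.filter (fun s => !(x :: xt).contains s) (y :: yt)
        = y :: List.filter (fun s => !(x :: xt).contains s) yt := by
      rw [List.filter_cons, e1]; simp
    have c2 : List.filter (fun s => !(y :: yt).contains s) (x :: xt)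
        = List.filter (fun s => !yt.contains s) (x :: xt) := by
      apply List.filter_congr; intro s hs
      simp [(hyns s hs).symm]
    have c3 : List.filter (fun s => (y :: yt).contains s) (x :: xt)
        = List.filter (fun s => yt.contains s) (x :: xt) := by
      apply List.filter_congr; intro s hs
      simp [(hyns s hs).symm]
    rw [c1, c2, c3]
    simp

-- sorted(s) is the filter of a strictly increasing list u when s's members are exactly u's members satisfying p.
lemma pvSortedFilter (u s : List String) (p : String → Bool)
    (hu : u.Pairwise (· < ·)) (hs : s.Nodup)
    (hmem : ∀ x, x ∈ s ↔ (x ∈ u ∧ p x = true)) :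
    PySem.List.sorted s (fun x => x) false = u.filter p := by
  apply PySem.List.sorted_eq_of_perm_of_pairwise_lt
  · rw [List.perm_ext_iff_of_nodup ((hu.imp ne_of_lt).filter p) hs]
    intro x
    simp [List.mem_filter, hmem x]
  · exact hu.filter p

-- per-key agreement: A's three sorted set operations are B's merge of the two sorted sides
lemma pvPerKey (la lb : List String) :
    let sa := PySem.Set.ofList la
    let sb := PySem.Set.ofList lb
    let xs := PySem.List.sorted sa (fun x => x) false
    let ys := PySem.List.sorted sb (fun x => x) false
    pvMerge xs ys [] [] []
      = (PySem.List.sorted (PySem.Set.diff sb sa) (fun x => x) false,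
         PySem.List.sorted (PySem.Set.diff sa sb) (fun x => x) false,
         PySem.List.sorted (PySem.Set.inter sa sb) (fun x => x) false) := by
  intro sa sb xs ys
  have hsa : List.Nodup sa := PySem.Set.nodup_ofList la
  have hsb : List.Nodup sb := PySem.Set.nodup_ofList lb
  have hxp : xs.Pairwise (· < ·) := PySem.List.sorted_ofList_pairwise_lt la
  have hyp : ys.Pairwise (· < ·) := PySem.List.sorted_ofList_pairwise_lt lb
  have hxm : ∀ t : String, t ∈ xs ↔ t ∈ sa := fun t => PySem.List.mem_sorted sa (fun x => x) false t
  have hym : ∀ t : String, t ∈ ys ↔ t ∈ sb := fun t => PySem.List.mem_sorted sb (fun x => x) false t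
  rw [pvMerge_eq xs ys hxp hyp [] [] []]
  simp only [List.nil_append]
  refine Prod.ext ?_ (Prod.ext ?_ ?_) <;> symm
  · apply pvSortedFilter ys _ _ hyp (PySem.Set.nodup_diff sb sa hsb)
    intro t
    rw [PySem.Set.mem_diff, hym t]
    simp [hxm t]
  · apply pvSortedFilter xs _ _ hxp (PySem.Set.nodup_diff sa sb hsa)
    intro t
    rw [PySem.Set.mem_diff, hxm t]
    simp [hym t]
  · apply pvSortedFilter xs _ _ hxp (PySem.Set.nodup_inter sa sb hsa)
    intro t
    rw [PySem.Set.mem_inter, hxm t]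
    simp [hym t]

-- ===== VERDICT (by name: the statement is the Claim_ definition above) =====
theorem diff_symbols_spec : Claim_equal_diff_symbols := by
  intro a b _ _
  unfold Spec_diff_symbols diff_symbols diff_symbols_alt
  congr 1
  apply PySem.List.foldl_congr_mem
  intro out p _
  simp only
  rw [pvPerKey (PySem.Dict.getD ⟨a⟩ p.1 []) (PySem.Dict.getD ⟨b⟩ p.1 [])]
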